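-- pv_equiv track=rewrite | github.com/blockhead22/GroundCheck | groundcheck/tuple_verifier.py | _attributes_match
-- ===== SOURCE A (Python) =====
-- def _attributes_match(
--
--     claimed_attr: str,
--     memory_attr: str,
-- ) -> bool:
--     """
--     Check if two attributes refer to the same property.
--
--     Handles related attributes like "employer" and "company".
--     """
--     claimed_lower = claimed_attr.lower().strip().replace(" ", "_")
--     memory_lower = memory_attr.lower().strip().replace(" ", "_")
--
--     # Direct match
--     if claimed_lower == memory_lower:
--         return True
--
--     # Related attribute groups
--     related_groups = [
--         {"employer", "company", "workplace", "employment_company", "work_at"},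
--         {"location", "city", "residence", "lives_in", "home"},
--         {"name", "full_name", "identity_name"},
--         {"title", "job_title", "role", "position"},
--         {"age", "years_old"},
--         {"hobby", "hobbies", "pastime", "interest"},
--     ]
--
--     for group in related_groups:
--         if claimed_lower in group and memory_lower in group:
--             return True
--
--     return False
-- ===== SOURCE B (Python) =====
-- _CANON = {
--     "employer": "employer", "company": "employer", "workplace": "employer",
--     "employment_company": "employer", "work_at": "employer",
--     "location": "location", "city": "location", "residence": "location",
--     "lives_in": "location", "home": "location",
--     "name": "name", "full_name": "name", "identity_name": "name",
--     "title": "title", "job_title": "title", "role": "title", "position": "title",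
--     "age": "age", "years_old": "age",
--     "hobby": "hobby", "hobbies": "hobby", "pastime": "hobby", "interest": "hobby",
-- }
--
--
-- def _attributes_match(
--     claimed_attr: str,
--     memory_attr: str,
-- ) -> bool:
--     """Two attributes match iff their canonical forms coincide."""
--     claimed = claimed_attr.lower().strip().replace(" ", "_")
--     memory = memory_attr.lower().strip().replace(" ", "_")
--     return _CANON.get(claimed, claimed) == _CANON.get(memory, memory)
-- ===== Notes on version B (the rewrite author's own statement) =====
-- stated objective: idiomatic
-- what changed: Replaces A's direct-equality short-circuit plus a loop scanning six alias sets for joint membership by canonicalization: each name is mapped to a canonical representative via a flat alias-to-representative table and the function returns a single comparison of the two canonical forms (no equality branch, no group scan).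
import Mathlib
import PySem

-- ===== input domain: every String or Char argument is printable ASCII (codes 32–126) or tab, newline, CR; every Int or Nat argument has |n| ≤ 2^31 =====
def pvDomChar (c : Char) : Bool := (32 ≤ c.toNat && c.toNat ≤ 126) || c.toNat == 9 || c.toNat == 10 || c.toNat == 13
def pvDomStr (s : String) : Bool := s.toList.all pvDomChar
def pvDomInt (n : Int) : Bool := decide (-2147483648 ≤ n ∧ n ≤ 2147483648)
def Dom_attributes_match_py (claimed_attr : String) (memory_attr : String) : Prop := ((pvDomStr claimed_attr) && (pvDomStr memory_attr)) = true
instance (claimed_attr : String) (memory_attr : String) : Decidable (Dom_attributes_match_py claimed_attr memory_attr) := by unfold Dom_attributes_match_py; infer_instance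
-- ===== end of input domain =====

-- B replaces A's equality short-circuit plus six-set group scan by canonicalization: each name maps
-- to a canonical representative through one flat table and the result is a single comparison (idiomatic; same results).

-- shared normalization: s.lower().strip().replace(" ", "_")
def pvNorm (s : String) : String := PySem.Str.replace (PySem.Str.strip (PySem.Str.lower s)) " " "_"

-- ===== PORT A =====
def pvRelatedGroups : List (PySem.Set String) :=
  [PySem.Set.ofList ["employer","company","workplace","employment_company","work_at"],
   PySem.Set.ofList ["location","city","residence","lives_in","home"],
   PySem.Set.ofList ["name","full_name","identity_name"],
   PySem.Set.ofList ["title","job_title","role","position"],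
   PySem.Set.ofList ["age","years_old"],
   PySem.Set.ofList ["hobby","hobbies","pastime","interest"]]

-- 'for group in related_groups: if claimed in group and memory in group: return True' / 'return False'
def pvGroupLoop (cl ml : String) : List (PySem.Set String) → Bool
  | [] => false
  | g :: rest => if PySem.Set.contains g cl && PySem.Set.contains g ml then true else pvGroupLoop cl ml rest

def attributes_match_py (claimed_attr : String) (memory_attr : String) : Bool :=
  let claimed_lower := pvNorm claimed_attr
  let memory_lower := pvNorm memory_attr
  if claimed_lower == memory_lower then true
  else pvGroupLoop claimed_lower memory_lower pvRelatedGroups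

-- ===== PORT B =====
-- module-level _CANON dict literal: alias → canonical representative
def pvCanon : PySem.Dict String String :=
  PySem.Dict.ofList [("employer","employer"), ("company","employer"), ("workplace","employer"), ("employment_company","employer"), ("work_at","employer"), ("location","location"), ("city","location"), ("residence","location"), ("lives_in","location"), ("home","location"), ("name","name"), ("full_name","name"), ("identity_name","name"), ("title","title"), ("job_title","title"), ("role","title"), ("position","title"), ("age","age"), ("years_old","age"), ("hobby","hobby"), ("hobbies","hobby"), ("pastime","hobby"), ("interest","hobby")]

def attributes_match_py_alt (claimed_attr : String) (memory_attr : String) : Bool :=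
  let claimed := pvNorm claimed_attr
  let memory := pvNorm memory_attr
  PySem.Dict.getD pvCanon claimed claimed == PySem.Dict.getD pvCanon memory memory

-- ===== PRECONDITION & SPEC =====
def Spec_attributes_match_py (claimed_attr : String) (memory_attr : String) (out : Bool) : Prop := out = attributes_match_py_alt claimed_attr memory_attr
instance (claimed_attr : String) (memory_attr : String) (out : Bool) : Decidable (Spec_attributes_match_py claimed_attr memory_attr out) := by unfold Spec_attributes_match_py; infer_instance

-- ===== CLAIM (what is proved, stated in full; the proofs are below) =====
def Claim_equal_attributes_match_py : Prop := ∀ (claimed_attr : String) (memory_attr : String), Dom_attributes_match_py claimed_attr memory_attr → Spec_attributes_match_py claimed_attr memory_attr (attributes_match_py claimed_attr memory_attr)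

-- ===== LEMMAS AND PROOFS =====

-- For every string s: membership in each group equals canonicalizing to that group's representative,
-- and the canonical lookup is either none (s is none of the aliases, in particular no representative)
-- or one of the six representatives.
lemma pvClassify (s : String) :
    (PySem.Set.contains (PySem.Set.ofList ["employer","company","workplace","employment_company","work_at"]) s = (PySem.Dict.get? pvCanon s == some "employer")) ∧
    (PySem.Set.contains (PySem.Set.ofList ["location","city","residence","lives_in","home"]) s = (PySem.Dict.get? pvCanon s == some "location")) ∧
    (PySem.Set.contains (PySem.Set.ofList ["name","full_name","identity_name"]) s = (PySem.Dict.get? pvCanon s == some "name")) ∧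
    (PySem.Set.contains (PySem.Set.ofList ["title","job_title","role","position"]) s = (PySem.Dict.get? pvCanon s == some "title")) ∧
    (PySem.Set.contains (PySem.Set.ofList ["age","years_old"]) s = (PySem.Dict.get? pvCanon s == some "age")) ∧
    (PySem.Set.contains (PySem.Set.ofList ["hobby","hobbies","pastime","interest"]) s = (PySem.Dict.get? pvCanon s == some "hobby")) ∧
    ((PySem.Dict.get? pvCanon s = none ∧ s ≠ "employer" ∧ s ≠ "location" ∧ s ≠ "name" ∧ s ≠ "title" ∧ s ≠ "age" ∧ s ≠ "hobby" ∧ "employer" ≠ s ∧ "location" ≠ s ∧ "name" ≠ s ∧ "title" ≠ s ∧ "age" ≠ s ∧ "hobby" ≠ s) ∨ PySem.Dict.get? pvCanon s = some "employer" ∨ PySem.Dict.get? pvCanon s = some "location" ∨ PySem.Dict.get? pvCanon s = some "name" ∨ PySem.Dict.get? pvCanon s = some "title" ∨ PySem.Dict.get? pvCanon s = some "age" ∨ PySem.Dict.get? pvCanon s = some "hobby") := by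
  by_cases h1 : s = "employer"
  · subst h1; decide
  by_cases h2 : s = "company"
  · subst h2; decide
  by_cases h3 : s = "workplace"
  · subst h3; decide
  by_cases h4 : s = "employment_company"
  · subst h4; decide
  by_cases h5 : s = "work_at"
  · subst h5; decide
  by_cases h6 : s = "location"
  · subst h6; decide
  by_cases h7 : s = "city"
  · subst h7; decide
  by_cases h8 : s = "residence"
  · subst h8; decide
  by_cases h9 : s = "lives_in"
  · subst h9; decide
  by_cases h10 : s = "home"
  · subst h10; decide
  by_cases h11 : s = "name"
  · subst h11; decide
  by_cases h12 : s = "full_name"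
  · subst h12; decide
  by_cases h13 : s = "identity_name"
  · subst h13; decide
  by_cases h14 : s = "title"
  · subst h14; decide
  by_cases h15 : s = "job_title"
  · subst h15; decide
  by_cases h16 : s = "role"
  · subst h16; decide
  by_cases h17 : s = "position"
  · subst h17; decide
  by_cases h18 : s = "age"
  · subst h18; decide
  by_cases h19 : s = "years_old"
  · subst h19; decide
  by_cases h20 : s = "hobby"
  · subst h20; decide
  by_cases h21 : s = "hobbies"
  · subst h21; decide
  by_cases h22 : s = "pastime"
  · subst h22; decide
  by_cases h23 : s = "interest"
  · subst h23; decide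
  have hnone : PySem.Dict.get? pvCanon s = none := by
    rw [show pvCanon = PySem.Dict.mk [("employer","employer"), ("company","employer"), ("workplace","employer"), ("employment_company","employer"), ("work_at","employer"), ("location","location"), ("city","location"), ("residence","location"), ("lives_in","location"), ("home","location"), ("name","name"), ("full_name","name"), ("identity_name","name"), ("title","title"), ("job_title","title"), ("role","title"), ("position","title"), ("age","age"), ("years_old","age"), ("hobby","hobby"), ("hobbies","hobby"), ("pastime","hobby"), ("interest","hobby")] from rfl]
    simp [PySem.Dict.get?, Ne.symm h1, Ne.symm h2, Ne.symm h3, Ne.symm h4, Ne.symm h5, Ne.symm h6, Ne.symm h7, Ne.symm h8, Ne.symm h9, Ne.symm h10, Ne.symm h11, Ne.symm h12, Ne.symm h13, Ne.symm h14, Ne.symm h15, Ne.symm h16, Ne.symm h17, Ne.symm h18, Ne.symm h19, Ne.symm h20, Ne.symm h21, Ne.symm h22, Ne.symm h23]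
  refine ⟨?_,?_,?_,?_,?_,?_,Or.inl ⟨hnone, h1, h6, h11, h14, h18, h20, Ne.symm h1, Ne.symm h6, Ne.symm h11, Ne.symm h14, Ne.symm h18, Ne.symm h20⟩⟩ <;>
    simp [PySem.Set.contains, PySem.Set.ofList, PySem.Set.add, hnone, h1, h2, h3, h4, h5, h6, h7, h8, h9, h10, h11, h12, h13, h14, h15, h16, h17, h18, h19, h20, h21, h22, h23]

-- A's body equals B's body on arbitrary normalized strings
lemma pvKey (cl ml : String) :
    (if (cl == ml) = true then true else pvGroupLoop cl ml pvRelatedGroups)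
      = (PySem.Dict.getD pvCanon cl cl == PySem.Dict.getD pvCanon ml ml) := by
  by_cases h : cl = ml
  · subst h; simp
  · have hne : (cl == ml) = false := by simp [h]
    obtain ⟨c0,c1,c2,c3,c4,c5,hcx⟩ := pvClassify cl
    obtain ⟨m0,m1,m2,m3,m4,m5,hmx⟩ := pvClassify ml
    simp only [hne, Bool.false_eq_true, if_false, PySem.Dict.getD_eq_get?_getD]
    simp only [pvRelatedGroups, pvGroupLoop, c0,c1,c2,c3,c4,c5, m0,m1,m2,m3,m4,m5]
    clear c0 c1 c2 c3 c4 c5 m0 m1 m2 m3 m4 m5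
    rcases hcx with ⟨h',e1,e2,e3,e4,e5,e6,f1,f2,f3,f4,f5,f6⟩|h'|h'|h'|h'|h'|h' <;>
      rcases hmx with ⟨h'',g1,g2,g3,g4,g5,g6,k1,k2,k3,k4,k5,k6⟩|h''|h''|h''|h''|h''|h'' <;>
      rw [h', h''] <;>
      simp only [Option.getD_some, Option.getD_none] <;>
      first
      | decide
      | exact (beq_eq_false_iff_ne.mpr h).symm
      | exact (beq_eq_false_iff_ne.mpr e1).symm
      | exact (beq_eq_false_iff_ne.mpr e2).symm
      | exact (beq_eq_false_iff_ne.mpr e3).symm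
      | exact (beq_eq_false_iff_ne.mpr e4).symm
      | exact (beq_eq_false_iff_ne.mpr e5).symm
      | exact (beq_eq_false_iff_ne.mpr e6).symm
      | exact (beq_eq_false_iff_ne.mpr k1).symm
      | exact (beq_eq_false_iff_ne.mpr k2).symm
      | exact (beq_eq_false_iff_ne.mpr k3).symm
      | exact (beq_eq_false_iff_ne.mpr k4).symm
      | exact (beq_eq_false_iff_ne.mpr k5).symm
      | exact (beq_eq_false_iff_ne.mpr k6).symm

-- ===== VERDICT (by name: the statement is the Claim_ definition above) =====
theorem attributes_match_py_spec : Claim_equal_attributes_match_py := by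
  intro claimed_attr memory_attr _
  unfold Spec_attributes_match_py attributes_match_py attributes_match_py_alt
  exact pvKey (pvNorm claimed_attr) (pvNorm memory_attr)
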